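-- pv_equiv track=rewrite | github.com/Leohojoo/HardVD | reprogramming.py | create_label_mapping
-- ===== SOURCE A (Python) =====
-- def create_label_mapping(n_classes, m_per_class, image_net_labels = None):
--     """
--     n_classes: No. of classes in text dataset
--     m_per_class: Number of imagenet labels to be mapped to each text class
--     """
--     if image_net_labels is None:
--         image_net_labels = range(1000)
--
--     class_mapping = [[] for i in range(n_classes)]
--
--     idx = 0
--     for _m in range(m_per_class):
--         for _class_no in range(n_classes):
--             class_mapping[_class_no].append(image_net_labels[idx])
--             idx += 1
--     return class_mapping
-- ===== SOURCE B (Python) =====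
-- def create_label_mapping(n_classes, m_per_class, image_net_labels=None):
--     """
--     n_classes: No. of classes in text dataset
--     m_per_class: Number of imagenet labels to be mapped to each text class
--     """
--     if image_net_labels is None:
--         image_net_labels = range(1000)
--
--     # chunk the consumed prefix into rounds of n_classes labels, then transpose
--     rounds = [image_net_labels[j * n_classes:(j + 1) * n_classes]
--               for j in range(m_per_class)]
--     return [[r[c] for r in rounds] for c in range(n_classes)]
-- ===== Notes on version B (the rewrite author's own statement) =====
-- stated objective: simpler
-- what changed: Replaces the mutable counter and append-into-preallocated-lists double loop by slicing the labels into m_per_class rounds of n_classes and transposing them with a nested comprehension.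
import Mathlib
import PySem

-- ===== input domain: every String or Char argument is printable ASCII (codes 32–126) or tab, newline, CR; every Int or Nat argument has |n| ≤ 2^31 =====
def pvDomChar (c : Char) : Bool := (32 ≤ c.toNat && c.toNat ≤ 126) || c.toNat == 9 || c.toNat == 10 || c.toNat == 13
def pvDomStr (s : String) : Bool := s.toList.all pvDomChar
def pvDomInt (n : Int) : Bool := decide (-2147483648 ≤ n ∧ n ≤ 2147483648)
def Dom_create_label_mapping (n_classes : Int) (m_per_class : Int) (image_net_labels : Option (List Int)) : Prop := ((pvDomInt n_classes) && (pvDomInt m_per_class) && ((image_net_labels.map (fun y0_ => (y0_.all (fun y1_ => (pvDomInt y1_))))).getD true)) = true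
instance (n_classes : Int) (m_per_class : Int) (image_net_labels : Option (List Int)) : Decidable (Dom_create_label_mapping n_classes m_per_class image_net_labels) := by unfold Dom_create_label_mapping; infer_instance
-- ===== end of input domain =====

-- B replaces A's counter-and-append double loop by chunking the labels into rounds and
-- transposing them (same cost; objective: simpler decomposition).


-- ===== PORT A =====
-- literal port: preallocated rows, running counter idx, append at position _class_no;
-- image_net_labels[idx] is ported as pyGetD with default 0 — the IndexError case
-- (idx out of range) is exactly what Pre_create_label_mapping excludes.
def create_label_mapping (n_classes : Int) (m_per_class : Int) (image_net_labels : Option (List Int)) : List (List Int) :=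
  let labels := image_net_labels.getD (PySem.List.pyRange 0 1000 1)
  let init : List (List Int) := (PySem.List.pyRange 0 n_classes 1).map (fun _ => [])
  let final :=
    (PySem.List.pyRange 0 m_per_class 1).foldl
      (fun st _m =>
        (PySem.List.pyRange 0 n_classes 1).foldl
          (fun st c =>
            (st.1.mapIdx (fun p row =>
                if (p : Int) = c then row ++ [PySem.List.pyGetD labels st.2 0] else row),
             st.2 + 1))
          st)
      (init, 0)
  final.1

-- ===== PORT B =====
-- literal port of Source B: slice the labels into rounds of n_classes, then transpose;
-- r[c] is ported as pyGetD with default 0 — its IndexError case is outside Pre_.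
def create_label_mapping_alt (n_classes : Int) (m_per_class : Int) (image_net_labels : Option (List Int)) : List (List Int) :=
  let labels := image_net_labels.getD (PySem.List.pyRange 0 1000 1)
  let rounds := (PySem.List.pyRange 0 m_per_class 1).map
    (fun j => PySem.List.slice labels (some (j * n_classes)) (some ((j + 1) * n_classes)))
  (PySem.List.pyRange 0 n_classes 1).map
    (fun c => rounds.map (fun r => PySem.List.pyGetD r c 0))

-- ===== PRECONDITION & SPEC =====
-- Pre_ excludes exactly the inputs where Python A raises IndexError:
-- n_classes*m_per_class labels are consumed, so more than len(labels) may not be asked for.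
def Pre_create_label_mapping (n_classes : Int) (m_per_class : Int) (image_net_labels : Option (List Int)) : Prop :=
  (0 < n_classes ∧ 0 < m_per_class) →
    n_classes * m_per_class ≤ ((image_net_labels.map (fun l => (l.length : Int))).getD 1000)
instance (n_classes : Int) (m_per_class : Int) (image_net_labels : Option (List Int)) : Decidable (Pre_create_label_mapping n_classes m_per_class image_net_labels) := by unfold Pre_create_label_mapping; infer_instance
def pvWitness_create_label_mapping : Int × Int × Option (List Int) := (3, 2, some [10, 20, 30, 40, 50, 60])
def Spec_create_label_mapping (n_classes : Int) (m_per_class : Int) (image_net_labels : Option (List Int)) (out : List (List Int)) : Prop := out = create_label_mapping_alt n_classes m_per_class image_net_labels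
instance (n_classes : Int) (m_per_class : Int) (image_net_labels : Option (List Int)) (out : List (List Int)) : Decidable (Spec_create_label_mapping n_classes m_per_class image_net_labels out) := by unfold Spec_create_label_mapping; infer_instance

-- ===== CLAIM (what is proved, stated in full; the proofs are below) =====
def Claim_equal_create_label_mapping : Prop := ∀ (n_classes : Int) (m_per_class : Int) (image_net_labels : Option (List Int)), Dom_create_label_mapping n_classes m_per_class image_net_labels → Pre_create_label_mapping n_classes m_per_class image_net_labels → Spec_create_label_mapping n_classes m_per_class image_net_labels (create_label_mapping n_classes m_per_class image_net_labels)

-- ===== LEMMAS AND PROOFS =====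

-- a foldl whose function ignores the list element is an iterate
theorem pv_foldl_ignore {α β : Type} (g : β → β) (l : List α) (init : β) :
    l.foldl (fun s _ => g s) init = g^[l.length] init := by
  induction l generalizing init with
  | nil => rfl
  | cons x xs ih => simp [List.foldl_cons, ih, Function.iterate_succ_apply]

-- the inner loop of A, over the tail pyRange a n 1, appends labels[i + (p - a)] to every row at
-- position p ≥ a and advances the counter by n - a
theorem pv_inner (labels : List Int) (n : Int) :
    ∀ (a : Int), 0 ≤ a → a ≤ n → ∀ (cm : List (List Int)) (i : Int),
    (PySem.List.pyRange a n 1).foldl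
      (fun st c =>
        (st.1.mapIdx (fun p row =>
            if (p : Int) = c then row ++ [PySem.List.pyGetD labels st.2 0] else row),
         st.2 + 1))
      (cm, i)
    = (cm.mapIdx (fun p row =>
        if a ≤ (p : Int) ∧ (p : Int) < n then row ++ [PySem.List.pyGetD labels (i + (p : Int) - a) 0] else row),
       i + max (n - a) 0) := by
  have H : ∀ (t : Nat) (a : Int), 0 ≤ a → a ≤ n → (n - a).toNat = t →
      ∀ (cm : List (List Int)) (i : Int),
      (PySem.List.pyRange a n 1).foldl
        (fun st c =>
          (st.1.mapIdx (fun p row =>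
              if (p : Int) = c then row ++ [PySem.List.pyGetD labels st.2 0] else row),
           st.2 + 1))
        (cm, i)
      = (cm.mapIdx (fun p row =>
          if a ≤ (p : Int) ∧ (p : Int) < n then row ++ [PySem.List.pyGetD labels (i + (p : Int) - a) 0] else row),
         i + max (n - a) 0) := by
    intro t
    induction t with
    | zero =>
      intro a ha han ht cm i
      have hna : n ≤ a := by omega
      rw [PySem.List.pyRange_one_eq_nil hna]
      simp only [List.foldl_nil]
      refine Prod.ext ?_ ?_
      · show cm = _
        refine List.ext_getElem (by simp) ?_
        intro p h1 h2
        rw [List.getElem_mapIdx, if_neg (by omega)]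
      · show i = i + max (n - a) 0
        omega
    | succ t ih =>
      intro a ha han ht cm i
      have hlt : a < n := by omega
      rw [PySem.List.pyRange_one_cons hlt]
      simp only [List.foldl_cons]
      rw [ih (a + 1) (by omega) (by omega) (by omega)]
      refine Prod.ext ?_ ?_
      · show List.mapIdx _ (List.mapIdx _ cm) = List.mapIdx _ cm
        refine List.ext_getElem (by simp) ?_
        intro p h1 h2
        simp only [List.getElem_mapIdx]
        by_cases hpa : (p : Int) = a
        · rw [if_neg (by omega), if_pos hpa, if_pos (by omega)]
          have : i + (p : Int) - a = i := by omega
          rw [this]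
        · rw [if_neg hpa]
          by_cases hin : a + 1 ≤ (p : Int) ∧ (p : Int) < n
          · rw [if_pos hin, if_pos (by omega)]
            have : i + 1 + (p : Int) - (a + 1) = i + (p : Int) - a := by omega
            rw [this]
          · rw [if_neg hin, if_neg (by omega)]
      · show i + 1 + max (n - (a + 1)) 0 = i + max (n - a) 0
        omega
  intro a ha han cm i
  exact H (n - a).toNat a ha han rfl cm i

-- the state after k outer iterations of A's loop
theorem pv_iter (labels : List Int) (n : Int) (hn : 0 < n) (k : Nat) :
    (fun st : List (List Int) × Int =>
      (PySem.List.pyRange 0 n 1).foldl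
        (fun st c =>
          (st.1.mapIdx (fun p row =>
              if (p : Int) = c then row ++ [PySem.List.pyGetD labels st.2 0] else row),
           st.2 + 1))
        st)^[k]
      ((PySem.List.pyRange 0 n 1).map (fun _ => []), 0)
    = ((PySem.List.pyRange 0 n 1).map
        (fun c => (List.range k).map (fun (j : Nat) => PySem.List.pyGetD labels ((j : Int) * n + c) 0)),
       (k : Int) * n) := by
  induction k with
  | zero =>
    simp only [Function.iterate_zero, id_eq, Nat.cast_zero, List.range_zero, List.map_nil,
      zero_mul]
  | succ k ih =>
    rw [Function.iterate_succ_apply', ih,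
      pv_inner labels n 0 le_rfl (le_of_lt hn)]
    refine Prod.ext ?_ ?_
    · show List.mapIdx _ _ = _
      refine List.ext_getElem (by simp) ?_
      intro p h1 h2
      have hp : (p : Int) < n := by
        have := h2
        simp only [List.length_map, PySem.List.length_pyRange_one] at this
        omega
      simp only [List.getElem_mapIdx, List.getElem_map,
        PySem.List.getElem_pyRange_one, zero_add]
      rw [if_pos ⟨Int.natCast_nonneg p, hp⟩, List.range_succ, List.map_append]
      simp only [List.map_cons, List.map_nil]
      norm_num
    · show (k : Int) * n + max (n - 0) 0 = (((k + 1 : Nat)) : Int) * n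
      rw [max_eq_left (by omega), Nat.cast_add, Nat.cast_one]
      ring

-- indexing a round slice = indexing labels at the strided position
theorem pv_slice_get (labels : List Int) (n c : Int) (j : Nat) (hc : 0 ≤ c) (hcn : c < n) :
    PySem.List.pyGetD
      (PySem.List.slice labels (some ((j : Int) * n)) (some (((j : Int) + 1) * n))) c 0
    = PySem.List.pyGetD labels ((j : Int) * n + c) 0 := by
  have hn : 0 < n := lt_of_le_of_lt hc hcn
  have hJ : (0 : Int) ≤ (j : Int) * n := by positivity
  have hJ1 : (0 : Int) ≤ ((j : Int) + 1) * n := by positivity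
  rw [PySem.List.slice_toNat labels hJ hJ1]
  rw [PySem.List.pyGetD_of_nonneg _ _ hc, PySem.List.pyGetD_of_nonneg _ _ (by omega)]
  have hsplit : ((j : Int) + 1) * n = (j : Int) * n + n := by ring
  have htake : ∀ (J : Int), 0 ≤ J → (J + n).toNat - J.toNat = n.toNat := by
    intro J hJ0
    omega
  rw [hsplit, htake _ hJ]
  have hct : c.toNat < n.toNat := by omega
  simp only [List.getD_eq_getElem?_getD]
  rw [List.getElem?_take_of_lt hct, List.getElem?_drop]
  have hidx : ((j : Int) * n).toNat + c.toNat = ((j : Int) * n + c).toNat := by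
    generalize (j : Int) * n = J at hJ
    omega
  rw [hidx]

-- ===== VERDICT (by name: the statement is the Claim_ definition above) =====
theorem create_label_mapping_spec : Claim_equal_create_label_mapping := by
  intro n m labels _hdom _hpre
  unfold Spec_create_label_mapping create_label_mapping create_label_mapping_alt
  simp only []
  by_cases hn : n ≤ 0
  · rw [PySem.List.pyRange_one_eq_nil hn]
    simp only [List.map_nil, List.foldl_nil]
    rw [pv_foldl_ignore (g := fun st : List (List Int) × Int => st)]
    simp [Function.iterate_fixed]
  · rw [not_le] at hn
    by_cases hm : m ≤ 0
    · rw [PySem.List.pyRange_one_eq_nil hm]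
      simp only [List.map_nil, List.foldl_nil, List.map_nil]
    · rw [not_le] at hm
      rw [pv_foldl_ignore
        (g := fun st : List (List Int) × Int =>
          (PySem.List.pyRange 0 n 1).foldl
            (fun st c =>
              (st.1.mapIdx (fun p row =>
                  if (p : Int) = c then
                    row ++ [PySem.List.pyGetD (labels.getD (PySem.List.pyRange 0 1000 1)) st.2 0]
                  else row),
               st.2 + 1))
            st)]
      rw [PySem.List.length_pyRange_one, pv_iter _ n hn]
      refine List.ext_getElem (by simp) ?_
      intro p h1 h2
      simp only [List.getElem_map, PySem.List.getElem_pyRange_one, zero_add, List.map_map]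
      rw [PySem.List.pyRange_one 0 m, List.map_map]
      simp only [Int.sub_zero]
      refine List.map_congr_left ?_
      intro j hj
      simp only [Function.comp_apply, zero_add]
      have hp0 : (0 : Int) ≤ (p : Int) := Int.natCast_nonneg p
      have hpn : (p : Int) < n := by
        have := h1
        simp only [List.length_map, PySem.List.length_pyRange_one] at this
        omega
      exact (pv_slice_get _ n (p : Int) j hp0 hpn).symm
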